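-- pv_equiv track=rewrite | github.com/tancredoli/myLeetcodePractise | Twitter_Unique_Twitter_User_Id_Set/solution.py | getUniqueUserIDSum
-- ===== SOURCE A (Python) =====
-- def getUniqueUserIDSum(arr:list):
--     cache = set()
--     for item in arr:
--         if item not in cache:
--             cache.add(item)
--         else:
--             while item in cache:
--                 item+=1
--             cache.add(item)
--     return sum(cache)
-- ===== SOURCE B (Python) =====
-- def getUniqueUserIDSum(arr: list):
--     # Sort first: the set of resolved ids is order-independent, so one
--     # increasing pass with a running 'prev' assigns each id in O(1).
--     total = 0
--     prev = None
--     for x in sorted(arr):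
--         if prev is None or x > prev:
--             cur = x
--         else:
--             cur = prev + 1
--         total += cur
--         prev = cur
--     return total
-- ===== Notes on version B (the rewrite author's own statement) =====
-- stated objective: faster
-- what changed: Replaces the per-element linear probing over a growing set (quadratic on duplicate-heavy input) by sort-then-single-increasing-pass assigning max(x, prev+1), using the order-independence of the resolved id set.
import Mathlib
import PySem

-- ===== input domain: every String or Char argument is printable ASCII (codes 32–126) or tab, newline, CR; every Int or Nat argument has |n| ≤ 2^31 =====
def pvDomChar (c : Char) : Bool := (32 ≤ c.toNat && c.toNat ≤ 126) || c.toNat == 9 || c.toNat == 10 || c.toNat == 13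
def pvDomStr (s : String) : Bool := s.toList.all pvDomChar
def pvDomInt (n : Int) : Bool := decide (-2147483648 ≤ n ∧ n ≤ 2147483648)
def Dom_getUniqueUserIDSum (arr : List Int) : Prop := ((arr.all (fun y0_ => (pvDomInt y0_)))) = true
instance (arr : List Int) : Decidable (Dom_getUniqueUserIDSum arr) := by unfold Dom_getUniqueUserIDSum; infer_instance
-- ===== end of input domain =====

-- B replaces A's per-element linear probing over a growing set by sort + one
-- increasing pass (cur = max(x, prev+1)); the return values are proved equal.

-- ===== PORT A =====

-- termination helper for the port's `while item in cache: item += 1` loop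
theorem pvCountP_succ_lt (S : List Int) (x : Int) (hx : x ∈ S) :
    (S.countP (fun y => decide (x + 1 ≤ y))) < S.countP (fun y => decide (x ≤ y)) := by
  induction S with
  | nil => cases hx
  | cons a t ih =>
    rw [List.countP_cons, List.countP_cons]
    have hmono := List.countP_mono_left (l := t) (p := fun y => decide (x + 1 ≤ y))
      (q := fun y => decide (x ≤ y)) (by intro y _ hy; simp_all; omega)
    rcases List.mem_cons.mp hx with rfl | ha
    · have h1 : decide (x + 1 ≤ x) = false := by simp
      have h2 : decide (x ≤ x) = true := by simp
      rw [h1, h2]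
      simp only [Bool.false_eq_true, reduceIte]
      omega
    · have := ih ha
      by_cases hb : x + 1 ≤ a
      · have h1 : decide (x + 1 ≤ a) = true := by simpa using hb
        have h2 : decide (x ≤ a) = true := by simp; omega
        rw [h1, h2]; simp only [reduceIte]; omega
      · have h1 : decide (x + 1 ≤ a) = false := by simpa using hb
        rw [h1]
        simp only [Bool.false_eq_true, reduceIte]
        cases h2 : decide (x ≤ a) <;> simp only [Bool.false_eq_true, reduceIte] <;> omega

-- `while item in cache: item += 1` of A, literally
def pvProbe (cache : PySem.Set Int) (item : Int) : Int :=
  if item ∈ cache then pvProbe cache (item + 1) else item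
termination_by (cache.countP (fun y => decide (item ≤ y)))
decreasing_by exact pvCountP_succ_lt cache item (by assumption)

def getUniqueUserIDSum (arr : List Int) : Int :=
  let cache : PySem.Set Int := arr.foldl (fun cache item =>
    if item ∉ cache then PySem.Set.add cache item
    else PySem.Set.add cache (pvProbe cache item)) PySem.Set.empty
  cache.sum

-- ===== PORT B =====
def getUniqueUserIDSum_alt (arr : List Int) : Int :=
  ((PySem.List.sorted arr (fun x => x) false).foldl
    (fun (st : Int × Option Int) x =>
      let cur : Int := match st.2 with
        | none => x
        | some prev => if x > prev then x else prev + 1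
      (st.1 + cur, some cur))
    (0, none)).1

-- ===== PRECONDITION & SPEC =====
def Spec_getUniqueUserIDSum (arr : List Int) (out : Int) : Prop := out = getUniqueUserIDSum_alt arr
instance (arr : List Int) (out : Int) : Decidable (Spec_getUniqueUserIDSum arr out) := by unfold Spec_getUniqueUserIDSum; infer_instance

-- ===== CLAIM (what is proved, stated in full; the proofs are below) =====
def Claim_equal_getUniqueUserIDSum : Prop := ∀ (arr : List Int), Dom_getUniqueUserIDSum arr → Spec_getUniqueUserIDSum arr (getUniqueUserIDSum arr)

-- ===== LEMMAS AND PROOFS =====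

-- first free slot ≥ x, on Finsets (canonical model of both folds)
def ffF (T : Finset Int) (x : Int) : Int :=
  if h : x ∈ T then ffF T (x + 1) else x
termination_by (T.filter (fun y => x ≤ y)).card
decreasing_by
  apply Finset.card_lt_card
  constructor
  · intro y hy
    simp only [Finset.mem_filter] at *
    exact ⟨hy.1, by omega⟩
  · intro hsub
    have hx : x ∈ T.filter (fun y => x ≤ y) := by simp [h]
    have := hsub hx
    simp at this

def stepF (T : Finset Int) (x : Int) : Finset Int := insert (ffF T x) T

def IsFF (T : Finset Int) (x v : Int) : Prop :=
  x ≤ v ∧ v ∉ T ∧ ∀ w, x ≤ w → w < v → w ∈ T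

theorem isFF_unique {T : Finset Int} {x v w : Int}
    (hv : IsFF T x v) (hw : IsFF T x w) : v = w := by
  obtain ⟨hv1, hv2, hv3⟩ := hv
  obtain ⟨hw1, hw2, hw3⟩ := hw
  by_contra hne
  rcases lt_or_gt_of_ne hne with h | h
  · exact hv2 (hw3 v hv1 h)
  · exact hw2 (hv3 w hw1 h)

theorem ffF_isFF (T : Finset Int) (x : Int) : IsFF T x (ffF T x) := by
  induction x using ffF.induct (T := T) with
  | case1 x h ih =>
    rw [ffF, dif_pos h]
    obtain ⟨h1, h2, h3⟩ := ih
    refine ⟨by omega, h2, ?_⟩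
    intro w hw1 hw2
    by_cases hwx : w = x
    · exact hwx ▸ h
    · exact h3 w (by omega) hw2
  | case2 x h =>
    rw [ffF, dif_neg h]
    exact ⟨le_refl x, h, fun w h1 h2 => absurd h2 (by omega)⟩

theorem pvProbe_eq_ffF (S : List Int) (x : Int) :
    pvProbe S x = ffF S.toFinset x := by
  induction x using pvProbe.induct (cache := S) with
  | case1 x h ih =>
    rw [pvProbe, if_pos h, ffF, dif_pos (List.mem_toFinset.mpr h), ih]
  | case2 x h =>
    rw [pvProbe, if_neg h, ffF, dif_neg (fun hc => h (List.mem_toFinset.mp hc))]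

-- commutation of stepF (the "abelian" property of placement)
theorem stepF_comm_aux (T : Finset Int) (x y : Int) (hxy : x ≤ y) :
    stepF (stepF T x) y = stepF (stepF T y) x := by
  set a := ffF T x with ha
  set c := ffF T y with hc
  have hA := ffF_isFF T x
  have hC := ffF_isFF T y
  rw [← ha] at hA; rw [← hc] at hC
  by_cases hac : a = c
  · -- both targets collide; the second placement is the same in either order
    have hb := ffF_isFF (insert a T) y
    have hd := ffF_isFF (insert a T) x
    have hya : y ≤ a := hac ▸ hC.1
    -- ffF (insert a T) y also satisfies IsFF from x
    have hIs : IsFF (insert a T) x (ffF (insert a T) y) := by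
      obtain ⟨h1, h2, h3⟩ := hb
      refine ⟨by omega, h2, ?_⟩
      intro w hw1 hw2
      by_cases hwy : y ≤ w
      · exact h3 w hwy hw2
      · have hwa : w < a := by omega
        exact Finset.mem_insert_of_mem (hA.2.2 w hw1 hwa)
    have : ffF (insert a T) y = ffF (insert a T) x := isFF_unique hIs hd
    simp only [stepF, ← ha, ← hc, ← hac, this]
  · -- distinct targets: each remains the first free slot after the other insert
    have h1 : ffF (insert a T) y = c := by
      apply isFF_unique (ffF_isFF (insert a T) y)
      refine ⟨hC.1, ?_, ?_⟩
      · simp only [Finset.mem_insert]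
        push Not
        exact ⟨fun h => hac h.symm, hC.2.1⟩
      · intro w hw1 hw2
        exact Finset.mem_insert_of_mem (hC.2.2 w hw1 hw2)
    have h2 : ffF (insert c T) x = a := by
      apply isFF_unique (ffF_isFF (insert c T) x)
      refine ⟨hA.1, ?_, ?_⟩
      · simp only [Finset.mem_insert]
        push Not
        exact ⟨hac, hA.2.1⟩
      · intro w hw1 hw2
        exact Finset.mem_insert_of_mem (hA.2.2 w hw1 hw2)
    simp only [stepF, ← ha, ← hc, h1, h2]
    exact Finset.insert_comm _ _ _

theorem stepF_comm (T : Finset Int) (x y : Int) :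
    stepF (stepF T x) y = stepF (stepF T y) x := by
  rcases le_total x y with h | h
  · exact stepF_comm_aux T x y h
  · exact (stepF_comm_aux T y x h).symm

-- ===== A-side: the fold over the PySem.Set tracks the Finset fold =====

theorem set_add_toFinset (s : PySem.Set Int) (x : Int) :
    (PySem.Set.add s x).toFinset = insert x s.toFinset := by
  ext a
  simp only [PySem.Set.mem_add, List.mem_toFinset, Finset.mem_insert]
  tauto

theorem set_add_nodup (s : PySem.Set Int) (x : Int) (h : s.Nodup) :
    (PySem.Set.add s x).Nodup := by
  by_cases hx : x ∈ s
  · simpa [PySem.Set.add, hx] using h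
  · simp only [PySem.Set.add]
    rw [if_neg (by simpa using hx)]
    rw [List.nodup_append]
    refine ⟨h, List.nodup_singleton x, ?_⟩
    intro a ha b hb
    have hbx : b = x := by simpa using hb
    subst hbx
    exact fun heq => hx (heq ▸ ha)

theorem astep_eq (cache : PySem.Set Int) (item : Int) :
    (if item ∉ cache then PySem.Set.add cache item
     else PySem.Set.add cache (pvProbe cache item))
    = PySem.Set.add cache (pvProbe cache item) := by
  by_cases h : item ∈ cache
  · simp [h]
  · rw [if_pos (by simpa using h), pvProbe, if_neg h]

theorem foldA (arr : List Int) :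
    ∀ (S : List Int), S.Nodup →
      (arr.foldl (fun cache item =>
        if item ∉ cache then PySem.Set.add cache item
        else PySem.Set.add cache (pvProbe cache item)) S).Nodup ∧
      (arr.foldl (fun cache item =>
        if item ∉ cache then PySem.Set.add cache item
        else PySem.Set.add cache (pvProbe cache item)) S).toFinset
        = arr.foldl stepF S.toFinset := by
  induction arr with
  | nil => intro S h; exact ⟨h, rfl⟩
  | cons a t ih =>
    intro S h
    rw [List.foldl_cons, astep_eq]
    have hstep : (PySem.Set.add S (pvProbe S a)).toFinset = stepF S.toFinset a := by
      rw [set_add_toFinset, pvProbe_eq_ffF]; rfl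
    obtain ⟨h1, h2⟩ := ih (PySem.Set.add S (pvProbe S a)) (set_add_nodup S _ h)
    exact ⟨h1, by rw [h2, hstep, List.foldl_cons]⟩

theorem a_eq_finset (arr : List Int) :
    getUniqueUserIDSum arr = (arr.foldl stepF ∅).sum id := by
  unfold getUniqueUserIDSum
  obtain ⟨h1, h2⟩ := foldA arr [] List.nodup_nil
  have := List.sum_toFinset (l := (arr.foldl (fun cache item =>
    if item ∉ cache then PySem.Set.add cache item
    else PySem.Set.add cache (pvProbe cache item)) [])) id h1
  simp only [List.toFinset_nil] at h2
  simp only [PySem.Set.empty]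
  rw [← h2] at *
  simpa using this.symm

-- ===== B-side: the increasing pass tracks the Finset fold on a sorted list =====

theorem b_inv (l : List Int) :
    ∀ (T : Finset Int) (prev total : Int),
      l.Pairwise (· ≤ ·) →
      (∀ t ∈ T, t ≤ prev) →
      (∀ x ∈ l, ∀ y, x ≤ y → y ≤ prev → y ∈ T) →
      total = T.sum id →
      (l.foldl (fun (st : Int × Option Int) x =>
        (st.1 + (match st.2 with
          | none => x
          | some prev => if x > prev then x else prev + 1),
         some (match st.2 with
          | none => x
          | some prev => if x > prev then x else prev + 1))) (total, some prev)).1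
        = (l.foldl stepF T).sum id := by
  induction l with
  | nil => intro T prev total _ _ _ ht; simpa using ht
  | cons x t ih =>
    intro T prev total hl hub hfill ht
    have hpair := (List.pairwise_cons.mp hl).1
    have htail := (List.pairwise_cons.mp hl).2
    by_cases hgt : x > prev
    · -- cur = x; first free ≥ x is x itself
      have hff : ffF T x = x := by
        apply isFF_unique (ffF_isFF T x)
        exact ⟨le_refl x, fun hc => by have := hub x hc; omega,
          fun w h1 h2 => absurd h2 (by omega)⟩
      have hxT : x ∉ T := fun hc => by have := hub x hc; omega
      simp only [List.foldl_cons, if_pos hgt]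
      rw [ih (insert x T) x (total + x) htail
        (by intro tt htt; rcases Finset.mem_insert.mp htt with rfl | htt
            · exact le_refl _
            · have := hub tt htt; omega)
        (by intro x' hx' y hy1 hy2
            have hx'x : x ≤ x' := hpair x' hx'
            have : y = x := by omega
            exact this ▸ Finset.mem_insert_self x T)
        (by rw [Finset.sum_insert hxT]; simp [ht]; ring)]
      simp only [stepF, hff]
    · -- cur = prev + 1; [x, prev] is filled, so first free ≥ x is prev + 1
      have hle : x ≤ prev := by omega
      have hff : ffF T x = prev + 1 := by
        apply isFF_unique (ffF_isFF T x)
        refine ⟨by omega, fun hc => by have := hub _ hc; omega, ?_⟩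
        intro w h1 h2
        exact hfill x (List.mem_cons_self) w h1 (by omega)
      have hpT : prev + 1 ∉ T := fun hc => by have := hub _ hc; omega
      simp only [List.foldl_cons, if_neg hgt]
      rw [ih (insert (prev + 1) T) (prev + 1) (total + (prev + 1)) htail
        (by intro tt htt; rcases Finset.mem_insert.mp htt with rfl | htt
            · exact le_refl _
            · have := hub tt htt; omega)
        (by intro x' hx' y hy1 hy2
            by_cases hyp : y ≤ prev
            · have hx'x : x ≤ x' := hpair x' hx'
              exact Finset.mem_insert_of_mem
                (hfill x List.mem_cons_self y (by omega) hyp)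
            · have : y = prev + 1 := by omega
              exact this ▸ Finset.mem_insert_self _ T)
        (by rw [Finset.sum_insert hpT]; simp [ht]; ring)]
      simp only [stepF, hff]

theorem b_eq_finset (arr : List Int) :
    getUniqueUserIDSum_alt arr = ((PySem.List.sorted arr (fun x => x) false).foldl stepF ∅).sum id := by
  unfold getUniqueUserIDSum_alt
  have hpw : (PySem.List.sorted arr (fun x => x) false).Pairwise (· ≤ ·) := by
    simpa using PySem.List.sorted_pairwise arr (fun x => x)
  cases hs : PySem.List.sorted arr (fun x => x) false with
  | nil => simp
  | cons x t =>
    rw [hs] at hpw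
    have hpair := (List.pairwise_cons.mp hpw).1
    have htail := (List.pairwise_cons.mp hpw).2
    simp only [List.foldl_cons]
    have hff : ffF ∅ x = x := by
      apply isFF_unique (ffF_isFF ∅ x)
      exact ⟨le_refl x, Finset.notMem_empty x, fun w h1 h2 => absurd h2 (by omega)⟩
    rw [b_inv t {x} x (0 + x) htail
      (by intro tt htt; rw [Finset.mem_singleton] at htt; omega)
      (by intro x' hx' y hy1 hy2
          have := hpair x' hx'
          have : y = x := by omega
          simp [this])
      (by simp)]
    simp only [stepF, hff]
    rfl

-- ===== VERDICT (by name: the statement is the Claim_ definition above) =====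
theorem getUniqueUserIDSum_spec : Claim_equal_getUniqueUserIDSum := by
  intro arr _
  unfold Spec_getUniqueUserIDSum
  rw [a_eq_finset, b_eq_finset]
  congr 1
  exact ((PySem.List.sorted_perm arr (fun x => x) false).foldl_eq'
    (fun x _ y _ z => stepF_comm z x y) ∅).symm
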